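-- pv_equiv track=rewrite | github.com/ahostbr/ShadowsAndShurikens | DevTools/python/save_context_anchor.py | parse_anchor_blocks
-- ===== SOURCE A (Python) =====
-- ANCHOR_START = "[CONTEXT_ANCHOR]"
--
-- ANCHOR_END = "[/CONTEXT_ANCHOR]"
--
-- def parse_anchor_blocks(text: str) -> list[str]:
--     blocks: list[str] = []
--     start = 0
--     while True:
--         i = text.find(ANCHOR_START, start)
--         if i == -1:
--             break
--         j = text.find(ANCHOR_END, i + len(ANCHOR_START))
--         if j == -1:
--             blocks.append(text[i:].strip())
--             break
--         blocks.append(text[i : j + len(ANCHOR_END)].strip())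
--         start = j + len(ANCHOR_END)
--     return blocks
-- ===== SOURCE B (Python) =====
-- ANCHOR_START = "[CONTEXT_ANCHOR]"
--
-- ANCHOR_END = "[/CONTEXT_ANCHOR]"
--
-- def parse_anchor_blocks(text: str) -> list[str]:
--     E = len(ANCHOR_END)
--     # phase 1: collect all ANCHOR_END positions (segment boundaries)
--     ends: list[int] = []
--     pos = 0
--     while True:
--         j = text.find(ANCHOR_END, pos)
--         if j == -1:
--             break
--         ends.append(j)
--         pos = j + E
--     # phase 2: for each END-terminated segment, emit the block begun by the
--     # first ANCHOR_START before that END (if any); then the dangling tail.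
--     blocks: list[str] = []
--     seg_start = 0
--     for j in ends:
--         i = text.find(ANCHOR_START, seg_start)
--         if i != -1 and i < j:
--             blocks.append(text[i : j + E].strip())
--         seg_start = j + E
--     i = text.find(ANCHOR_START, seg_start)
--     if i != -1:
--         blocks.append(text[i:].strip())
--     return blocks
-- ===== Notes on version B (the rewrite author's own statement) =====
-- stated objective: alternative
-- what changed: B first collects all ANCHOR_END positions in one pass, then maps each END-terminated segment (and finally the dangling tail) to its block, instead of A's single loop that interleaves find-START and find-END with a moving cursor.
import Mathlib
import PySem

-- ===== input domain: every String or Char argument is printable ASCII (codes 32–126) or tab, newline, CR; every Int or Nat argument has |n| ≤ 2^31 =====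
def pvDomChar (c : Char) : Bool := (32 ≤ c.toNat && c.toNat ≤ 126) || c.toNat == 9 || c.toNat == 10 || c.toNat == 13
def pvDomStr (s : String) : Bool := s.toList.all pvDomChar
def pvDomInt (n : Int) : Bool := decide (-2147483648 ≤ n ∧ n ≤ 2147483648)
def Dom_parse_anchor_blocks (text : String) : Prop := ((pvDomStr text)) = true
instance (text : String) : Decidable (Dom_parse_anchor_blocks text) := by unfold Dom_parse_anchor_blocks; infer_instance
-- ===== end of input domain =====

-- B re-implements A by first collecting all ANCHOR_END positions and then mapping each
-- END-terminated segment (plus the dangling tail) to its block; same return value, no side effects.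

-- ===== PORT A =====
-- ANCHOR_START = "[CONTEXT_ANCHOR]"  (16 chars, as a char list)
def pvAS : List Char := ['[','C','O','N','T','E','X','T','_','A','N','C','H','O','R',']']
-- ANCHOR_END = "[/CONTEXT_ANCHOR]"  (17 chars, as a char list)
def pvAE : List Char := ['[','/','C','O','N','T','E','X','T','_','A','N','C','H','O','R',']']

-- the while-loop of A; `fuel` is only a totality guard (each iteration moves `start`
-- past a 17-char ANCHOR_END, so fuel = len + 1 is never exhausted)
def pvLoopA (s : List Char) (fuel : Nat) (start : Nat) : List String :=
  match fuel with
  | 0 => []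
  | fuel + 1 =>
    if PySem.Chars.findFrom s pvAS (start : Int) none = -1 then []
    else
      if PySem.Chars.findFrom s pvAE (PySem.Chars.findFrom s pvAS (start : Int) none + 16) none = -1 then
        [String.ofList (PySem.Chars.strip (PySem.List.slice s (some (PySem.Chars.findFrom s pvAS (start : Int) none)) none))]
      else
        String.ofList (PySem.Chars.strip (PySem.List.slice s
            (some (PySem.Chars.findFrom s pvAS (start : Int) none))
            (some (PySem.Chars.findFrom s pvAE (PySem.Chars.findFrom s pvAS (start : Int) none + 16) none + 17))))
          :: pvLoopA s fuel ((PySem.Chars.findFrom s pvAE (PySem.Chars.findFrom s pvAS (start : Int) none + 16) none).toNat + 17)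

def parse_anchor_blocks (text : String) : List String :=
  pvLoopA text.toList (text.toList.length + 1) 0

-- ===== PORT B =====
-- phase 1 of B: the list of all ANCHOR_END positions, in order (fuel: totality guard as above)
def pvEnds (s : List Char) (fuel : Nat) (pos : Nat) : List Nat :=
  match fuel with
  | 0 => []
  | fuel + 1 =>
    if PySem.Chars.findFrom s pvAE (pos : Int) none = -1 then []
    else (PySem.Chars.findFrom s pvAE (pos : Int) none).toNat ::
      pvEnds s fuel ((PySem.Chars.findFrom s pvAE (pos : Int) none).toNat + 17)

-- phase 2 of B: map each END-terminated segment to its block, then handle the dangling tail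
def pvGoB (s : List Char) (ends : List Nat) (segStart : Nat) : List String :=
  match ends with
  | [] =>
      if PySem.Chars.findFrom s pvAS (segStart : Int) none = -1 then []
      else [String.ofList (PySem.Chars.strip (PySem.List.slice s (some (PySem.Chars.findFrom s pvAS (segStart : Int) none)) none))]
  | j :: rest =>
      if PySem.Chars.findFrom s pvAS (segStart : Int) none ≠ -1 ∧
         PySem.Chars.findFrom s pvAS (segStart : Int) none < (j : Int) then
        String.ofList (PySem.Chars.strip (PySem.List.slice s
            (some (PySem.Chars.findFrom s pvAS (segStart : Int) none)) (some ((j : Int) + 17))))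
          :: pvGoB s rest (j + 17)
      else pvGoB s rest (j + 17)

def parse_anchor_blocks_alt (text : String) : List String :=
  pvGoB text.toList (pvEnds text.toList (text.toList.length + 1) 0) 0

-- ===== PRECONDITION & SPEC =====
def Spec_parse_anchor_blocks (text : String) (out : List String) : Prop := out = parse_anchor_blocks_alt text
instance (text : String) (out : List String) : Decidable (Spec_parse_anchor_blocks text out) := by unfold Spec_parse_anchor_blocks; infer_instance

-- ===== CLAIM (what is proved, stated in full; the proofs are below) =====
def Claim_equal_parse_anchor_blocks : Prop := ∀ (text : String), Dom_parse_anchor_blocks text → Spec_parse_anchor_blocks text (parse_anchor_blocks text)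

-- ===== LEMMAS AND PROOFS =====

-- find(sub, k) succeeding means the search started inside the string
lemma pv_ff_le (s sub : List Char) (k : Int) (h : PySem.Chars.findFrom s sub k none ≠ -1) :
    k ≤ (s.length : Int) := by
  by_contra hlt
  apply h
  simp only [PySem.Chars.findFrom]
  split_ifs <;> omega

-- find(sub, k) starting past the end of the string fails
lemma pv_ff_big (s sub : List Char) (k : Int) (h : (s.length : Int) < k) :
    PySem.Chars.findFrom s sub k none = -1 := by
  by_contra h'
  exact absurd (pv_ff_le s sub k h') (by omega)

-- find(sub, k) succeeding returns a position at or after k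
lemma pv_ff_ge (s sub : List Char) (k : Int) (hk : 0 ≤ k)
    (h : PySem.Chars.findFrom s sub k none ≠ -1) : k ≤ PySem.Chars.findFrom s sub k none := by
  have hle : k ≤ (s.length : Int) := pv_ff_le s sub k h
  have hk' : k = ((k.toNat : Nat) : Int) := by omega
  rw [hk'] at h ⊢
  exact (PySem.Chars.findFrom_natCast_spec s sub k.toNat (by omega) h).1

-- if find(sub, k) = -1 then sub occurs nowhere at or after k
lemma pv_ff_none (s sub : List Char) (hsub : sub ≠ []) (k : Int) (hk : 0 ≤ k)
    (h : PySem.Chars.findFrom s sub k none = -1) :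
    ∀ m : Nat, k ≤ m → ¬ sub <+: s.drop m := by
  intro m hm hp
  by_cases hkl : k ≤ (s.length : Int)
  · have hk' : k = ((k.toNat : Nat) : Int) := by omega
    rw [hk'] at h
    rw [PySem.Chars.findFrom_natCast_eq_neg_one_iff s sub k.toNat (by omega)] at h
    apply h
    have h1 : s.drop m = (s.drop k.toNat).drop (m - k.toNat) := by
      rw [List.drop_drop]; congr 1; omega
    have h2 : s.drop m <:+ s.drop k.toNat := h1 ▸ List.drop_suffix _ _
    exact hp.isInfix.trans h2.isInfix
  · have hnil : s.drop m = [] := List.drop_eq_nil_of_le (by omega)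
    rw [hnil] at hp
    exact hsub (List.prefix_nil.mp hp)

-- if find(sub, k) ≠ -1 it is the first occurrence position at or after k
lemma pv_ff_spec (s sub : List Char) (k : Int) (hk : 0 ≤ k)
    (h : PySem.Chars.findFrom s sub k none ≠ -1) :
    k ≤ PySem.Chars.findFrom s sub k none ∧
    sub <+: s.drop (PySem.Chars.findFrom s sub k none).toNat ∧
    ∀ m : Nat, k ≤ m → (m : Int) < PySem.Chars.findFrom s sub k none → ¬ sub <+: s.drop m := by
  have hle : k ≤ (s.length : Int) := pv_ff_le s sub k h
  have hk' : k = ((k.toNat : Nat) : Int) := by omega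
  rw [hk'] at h ⊢
  obtain ⟨h1, h2, h3⟩ := PySem.Chars.findFrom_natCast_spec s sub k.toNat (by omega) h
  refine ⟨h1, h2, ?_⟩
  intro m hm hlt
  exact h3 m (by omega) (by omega)

-- find(sub, k) is determined by "first occurrence at or after k"
lemma pv_ff_eq (s sub : List Char) (hsub : sub ≠ []) (k : Int) (hk : 0 ≤ k) (r : Nat)
    (hkr : k ≤ (r : Int)) (hp : sub <+: s.drop r)
    (hmin : ∀ m : Nat, k ≤ m → m < r → ¬ sub <+: s.drop m) :
    PySem.Chars.findFrom s sub k none = (r : Int) := by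
  have hne : PySem.Chars.findFrom s sub k none ≠ -1 := by
    intro h0
    exact pv_ff_none s sub hsub k hk h0 r hkr hp
  obtain ⟨h1, h2, h3⟩ := pv_ff_spec s sub k hk hne
  rcases lt_trichotomy (PySem.Chars.findFrom s sub k none) (r : Int) with hlt | heq | hgt
  · exact absurd h2 (hmin (PySem.Chars.findFrom s sub k none).toNat (by omega) (by omega))
  · exact heq
  · exact absurd hp (h3 r hkr hgt)

lemma pv_prefix_getElem (l t : List Char) (h : l <+: t) (k : Nat) (hk : k < l.length) :
    t[k]? = some l[k] := by
  obtain ⟨r, rfl⟩ := h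
  rw [List.getElem?_append_left hk, List.getElem?_eq_getElem hk]

-- a pattern occurring at position a pins down the characters of s at a+k
lemma pv_occ_char (s p : List Char) (a k : Nat) (h : p <+: s.drop a) (hk : k < p.length) :
    s[a + k]? = some p[k] := by
  have h1 := pv_prefix_getElem p (s.drop a) h k hk
  rw [List.getElem?_drop] at h1
  exact h1

-- no ANCHOR_END can begin inside an occurrence of ANCHOR_START
lemma pv_no_E_in_S (s : List Char) (a b : Nat) (ha : pvAS <+: s.drop a) (hb : pvAE <+: s.drop b)
    (h1 : a ≤ b) (h2 : b < a + 16) : False := by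
  obtain ⟨d, rfl⟩ : ∃ d, b = a + d := ⟨b - a, by omega⟩
  have hd : d < 16 := by omega
  rcases Nat.eq_zero_or_pos d with h0 | h0
  · subst h0
    have hx := pv_occ_char s pvAS a 1 ha (by decide)
    have hy := pv_occ_char s pvAE (a + 0) 1 hb (by decide)
    rw [Nat.add_zero] at hy
    rw [hx] at hy
    exact absurd (Option.some.inj hy) (by decide)
  · have hx := pv_occ_char s pvAS a d ha (by simp [pvAS]; omega)
    have hy := pv_occ_char s pvAE (a + d) 0 hb (by decide)
    rw [Nat.add_zero] at hy
    rw [hx] at hy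
    have hc := Option.some.inj hy
    interval_cases d <;> simp [pvAS, pvAE] at hc

-- no ANCHOR_START can begin inside an occurrence of ANCHOR_END
lemma pv_no_S_in_E (s : List Char) (a b : Nat) (ha : pvAE <+: s.drop a) (hb : pvAS <+: s.drop b)
    (h1 : a ≤ b) (h2 : b < a + 17) : False := by
  obtain ⟨d, rfl⟩ : ∃ d, b = a + d := ⟨b - a, by omega⟩
  have hd : d < 17 := by omega
  rcases Nat.eq_zero_or_pos d with h0 | h0
  · subst h0
    have hx := pv_occ_char s pvAE a 1 ha (by decide)
    have hy := pv_occ_char s pvAS (a + 0) 1 hb (by decide)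
    rw [Nat.add_zero] at hy
    rw [hx] at hy
    exact absurd (Option.some.inj hy) (by decide)
  · have hx := pv_occ_char s pvAE a d ha (by simp [pvAE]; omega)
    have hy := pv_occ_char s pvAS (a + d) 0 hb (by decide)
    rw [Nat.add_zero] at hy
    rw [hx] at hy
    have hc := Option.some.inj hy
    interval_cases d <;> simp [pvAS, pvAE] at hc

-- A's loop returns nothing once start is past the end of the text
lemma pv_loopA_dead (s : List Char) (f start : Nat) (h : s.length < start) :
    pvLoopA s f start = [] := by
  cases f with
  | zero => rfl
  | succ g =>
    simp only [pvLoopA]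
    rw [if_pos (pv_ff_big s pvAS (start : Int) (by omega))]

-- any sufficient fuel computes the same value of A's loop
lemma pv_loopA_mono (s : List Char) : ∀ (f₁ f₂ start : Nat),
    s.length + 1 - start ≤ f₁ → s.length + 1 - start ≤ f₂ →
    pvLoopA s f₁ start = pvLoopA s f₂ start := by
  intro f₁
  induction f₁ with
  | zero =>
    intro f₂ start h1 h2
    rw [pv_loopA_dead s 0 start (by omega), pv_loopA_dead s f₂ start (by omega)]
  | succ f ih =>
    intro f₂ start h1 h2
    by_cases hs : s.length < start
    · rw [pv_loopA_dead s _ _ hs, pv_loopA_dead s _ _ hs]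
    · cases f₂ with
      | zero => omega
      | succ g =>
        simp only [pvLoopA]
        by_cases hi : PySem.Chars.findFrom s pvAS (start : Int) none = -1
        · rw [if_pos hi, if_pos hi]
        · rw [if_neg hi, if_neg hi]
          by_cases hj : PySem.Chars.findFrom s pvAE
              (PySem.Chars.findFrom s pvAS (start : Int) none + 16) none = -1
          · rw [if_pos hj, if_pos hj]
          · rw [if_neg hj, if_neg hj]
            have hi1 : (start : Int) ≤ PySem.Chars.findFrom s pvAS (start : Int) none :=
              pv_ff_ge s pvAS (start : Int) (by omega) hi
            have hj1 := pv_ff_ge s pvAE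
              (PySem.Chars.findFrom s pvAS (start : Int) none + 16) (by omega) hj
            congr 1
            exact ih g _ (by omega) (by omega)

-- when no ANCHOR_START occurs at or after pos, B emits nothing
lemma pv_goB_nil (s : List Char) : ∀ (fuel pos : Nat),
    (∀ m : Nat, pos ≤ m → ¬ pvAS <+: s.drop m) →
    pvGoB s (pvEnds s fuel pos) pos = [] := by
  intro fuel
  induction fuel with
  | zero =>
    intro pos h
    have hS : PySem.Chars.findFrom s pvAS (pos : Int) none = -1 := by
      by_contra h'
      obtain ⟨hp1, hp2, _⟩ := pv_ff_spec s pvAS (pos : Int) (by omega) h'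
      exact h _ (by omega) hp2
    simp [pvEnds, pvGoB, hS]
  | succ fuel ih =>
    intro pos h
    have hS : PySem.Chars.findFrom s pvAS (pos : Int) none = -1 := by
      by_contra h'
      obtain ⟨hp1, hp2, _⟩ := pv_ff_spec s pvAS (pos : Int) (by omega) h'
      exact h _ (by omega) hp2
    simp only [pvEnds]
    split
    · simp [pvGoB, hS]
    · rename_i hj
      obtain ⟨hE1, hE2, hE3⟩ := pv_ff_spec s pvAE (pos : Int) (by omega) hj
      simp only [pvGoB]
      rw [if_neg (by intro hc; exact hc.1 hS)]
      exact ih _ (fun m hm => h m (by omega))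

-- the main invariant: A's loop from start equals B's segment map over the ENDs from start
lemma pv_main (s : List Char) : ∀ (fuel start : Nat), s.length + 1 - start ≤ fuel →
    pvLoopA s fuel start = pvGoB s (pvEnds s fuel start) start := by
  intro fuel
  induction fuel with
  | zero =>
    intro start hf
    have hS : PySem.Chars.findFrom s pvAS (start : Int) none = -1 :=
      pv_ff_big s pvAS (start : Int) (by omega)
    simp [pvLoopA, pvEnds, pvGoB, hS]
  | succ fuel IH =>
    intro start hf
    simp only [pvEnds]
    split
    · -- no ANCHOR_END at or after start
      rename_i hjE
      have hnoE : ∀ m : Nat, (start : Int) ≤ m → ¬ pvAE <+: s.drop m :=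
        pv_ff_none s pvAE (by decide) (start : Int) (by omega) hjE
      by_cases hi : PySem.Chars.findFrom s pvAS (start : Int) none = -1
      · simp only [pvLoopA]
        rw [if_pos hi]
        simp [pvGoB, hi]
      · obtain ⟨hi1, hi2, hi3⟩ := pv_ff_spec s pvAS (start : Int) (by omega) hi
        have hj : PySem.Chars.findFrom s pvAE
            (PySem.Chars.findFrom s pvAS (start : Int) none + 16) none = -1 := by
          by_contra h'
          obtain ⟨hq1, hq2, _⟩ := pv_ff_spec s pvAE _ (by omega) h'
          exact hnoE _ (by omega) hq2
        simp only [pvLoopA]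
        rw [if_neg hi, if_pos hj]
        simp [pvGoB, hi]
    · -- first ANCHOR_END at or after start is at jN
      rename_i hjE
      obtain ⟨hj1, hj2, hj3⟩ := pv_ff_spec s pvAE (start : Int) (by omega) hjE
      have hlen : (start : Int) ≤ s.length := pv_ff_le s pvAE (start : Int) hjE
      have hjlen : (PySem.Chars.findFrom s pvAE (start : Int) none).toNat + 17 ≤ s.length := by
        have hlenE := hj2.length_le
        rw [List.length_drop] at hlenE
        have h17 : pvAE.length = 17 := rfl
        omega
      by_cases hi : PySem.Chars.findFrom s pvAS (start : Int) none = -1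
      · -- no ANCHOR_START at all: both sides empty
        simp only [pvLoopA]
        rw [if_pos hi]
        simp only [pvGoB]
        rw [if_neg (by intro hc; exact hc.1 hi)]
        rw [pv_goB_nil s _ _ (fun m hm =>
          pv_ff_none s pvAS (by decide) (start : Int) (by omega) hi m (by omega))]
      · obtain ⟨hi1, hi2, hi3⟩ := pv_ff_spec s pvAS (start : Int) (by omega) hi
        by_cases hlt : PySem.Chars.findFrom s pvAS (start : Int) none <
            ((PySem.Chars.findFrom s pvAE (start : Int) none).toNat : Int)
        · -- the block ends at jN: A's inner find returns exactly jN
          have hge : (PySem.Chars.findFrom s pvAS (start : Int) none).toNat + 16 ≤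
              (PySem.Chars.findFrom s pvAE (start : Int) none).toNat := by
            by_contra hc
            exact pv_no_E_in_S s _ _ hi2 hj2 (by omega) (by omega)
          have hjA : PySem.Chars.findFrom s pvAE
              (PySem.Chars.findFrom s pvAS (start : Int) none + 16) none =
              ((PySem.Chars.findFrom s pvAE (start : Int) none).toNat : Int) := by
            apply pv_ff_eq s pvAE (by decide) _ (by omega) _ (by omega) hj2
            intro m hm hmlt
            exact hj3 m (by omega) (by omega)
          simp only [pvLoopA]
          rw [if_neg hi, hjA]
          rw [if_neg (by omega)]
          simp only [pvGoB]
          rw [if_pos ⟨hi, hlt⟩]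
          simp only [Int.toNat_natCast]
          congr 1
          exact IH _ (by omega)
        · -- the first START lies beyond jN: A just skips this END
          have hge : (PySem.Chars.findFrom s pvAE (start : Int) none).toNat + 17 ≤
              (PySem.Chars.findFrom s pvAS (start : Int) none).toNat := by
            by_contra hc
            exact pv_no_S_in_E s _ _ hj2 hi2 (by omega) (by omega)
          have hS' : PySem.Chars.findFrom s pvAS
              (((PySem.Chars.findFrom s pvAE (start : Int) none).toNat + 17 : Nat) : Int) none =
              ((PySem.Chars.findFrom s pvAS (start : Int) none).toNat : Int) := by
            apply pv_ff_eq s pvAS (by decide) _ (by omega) _ (by omega) hi2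
            intro m hm hmlt
            exact hi3 m (by omega) (by omega)
          have hicast : PySem.Chars.findFrom s pvAS (start : Int) none =
              ((PySem.Chars.findFrom s pvAS (start : Int) none).toNat : Int) := by omega
          have hLL : pvLoopA s (fuel + 1) start =
              pvLoopA s (fuel + 1) ((PySem.Chars.findFrom s pvAE (start : Int) none).toNat + 17) := by
            simp only [pvLoopA]
            rw [hS', ← hicast]
          rw [hLL]
          rw [pv_loopA_mono s (fuel + 1) fuel _ (by omega) (by omega)]
          simp only [pvGoB]
          rw [if_neg (by intro hc; exact hlt hc.2)]
          exact IH _ (by omega)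

-- ===== VERDICT (by name: the statement is the Claim_ definition above) =====
theorem parse_anchor_blocks_spec : Claim_equal_parse_anchor_blocks := by
  intro text _
  unfold Spec_parse_anchor_blocks parse_anchor_blocks parse_anchor_blocks_alt
  exact pv_main text.toList (text.toList.length + 1) 0 (by omega)
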